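-- pv_equiv track=rewrite | github.com/Aishwarya-Tonpe/cis6930sp24-assignment2 | Assignment2.py | rank_incidents
-- ===== SOURCE A (Python) =====
-- from collections import Counter
--
-- def rank_incidents(incident_data):
--     incident_type = [incident['nature'] for incident in incident_data]
--
--     # Count occurrences of each incident
--     incident_counter = Counter(incident_type)
--
--     # Sort incidents by frequency
--     sorted_incident_types = sorted(incident_counter, key=lambda x: (-incident_counter[x], x))
--
--     # Assign integer rankings to incidents with tie-breaking logic
--     incident_rankings = {}
--     rank = 1
--     prev_count = None
--     for incident in sorted_incident_types:
--         count = incident_counter[incident]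
--         new_rank = rank + count
--
--         incident_rankings[incident] = rank
--         rank = new_rank
--
--     return incident_rankings
-- ===== SOURCE B (Python) =====
-- from collections import Counter
--
-- def rank_incidents(incident_data):
--     cnt = Counter(incident['nature'] for incident in incident_data)
--
--     # rank of a type = 1 + number of incident records whose type strictly
--     # precedes it in the display order (more frequent first, then alphabetical);
--     # computed independently per type, no running accumulator
--     def rank(n):
--         return 1 + sum(m for t, m in cnt.items() if (-m, t) < (-cnt[n], n))
--
--     # ranks are pairwise distinct and ascending rank is exactly the display order
--     return {n: rank(n) for n in sorted(cnt, key=rank)}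
-- ===== Notes on version B (the rewrite author's own statement) =====
-- stated objective: alternative
-- what changed: A sorts the type names by (-count, name) and threads a running rank through an accumulator loop; B computes every type's rank independently as 1 + the total count of incidents of strictly-preceding types (pairwise dominance counting over Counter.items, no accumulation), then orders the names by that rank value.
import Mathlib
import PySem

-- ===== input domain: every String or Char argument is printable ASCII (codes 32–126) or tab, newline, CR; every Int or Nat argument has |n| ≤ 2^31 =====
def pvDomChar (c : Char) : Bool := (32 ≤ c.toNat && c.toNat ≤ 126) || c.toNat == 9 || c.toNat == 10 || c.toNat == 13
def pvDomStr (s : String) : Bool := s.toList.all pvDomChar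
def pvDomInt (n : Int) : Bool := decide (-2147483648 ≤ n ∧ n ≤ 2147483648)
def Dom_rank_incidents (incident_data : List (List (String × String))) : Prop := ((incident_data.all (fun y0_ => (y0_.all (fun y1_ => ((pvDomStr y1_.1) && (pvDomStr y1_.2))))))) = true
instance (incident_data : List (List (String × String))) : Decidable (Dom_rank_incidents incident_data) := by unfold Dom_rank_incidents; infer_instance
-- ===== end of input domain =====

-- B replaces A's sort-then-running-rank loop by independent pairwise dominance
-- counting: each type's rank is 1 + the total count of strictly-preceding types,
-- and the names are then ordered by that rank value; same result, O(k^2) ranks.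

-- incident['nature']: exact whenever the key is present (Pre_ below excludes the KeyError case)
def natureOf (inc : List (String × String)) : String :=
  ((PySem.Dict.ofList inc).get? "nature").getD ""

-- ===== PORT A =====
def rank_incidents (incident_data : List (List (String × String))) : List (String × Int) :=
  let incident_type := incident_data.map natureOf
  let incident_counter := PySem.Dict.counter incident_type
  let sorted_incident_types :=
    PySem.List.sorted2 incident_counter.keys
      (fun x => -(incident_counter.getD x 0)) (fun x => x)
  -- rank-assignment loop: state = (incident_rankings, rank)
  let final := sorted_incident_types.foldl
    (fun (s : PySem.Dict String Int × Int) incident =>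
      let count := incident_counter.getD incident 0
      let new_rank := s.2 + count
      (s.1.insert incident s.2, new_rank))
    (PySem.Dict.empty, 1)
  final.1.items

-- ===== PORT B =====
-- rank(n) = 1 + sum(m for t, m in cnt.items() if (-m, t) < (-cnt[n], n))
def rankOf (cnt : PySem.Dict String Int) (n : String) : Int :=
  1 + cnt.items.foldl
    (fun s p =>
      if -p.2 < -(cnt.getD n 0) ∨ (-p.2 = -(cnt.getD n 0) ∧ p.1 < n) then s + p.2 else s)
    0

def rank_incidents_alt (incident_data : List (List (String × String))) : List (String × Int) :=
  let cnt := PySem.Dict.counter (incident_data.map natureOf)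
  -- {n: rank(n) for n in sorted(cnt, key=rank)}
  let ordered := PySem.List.sorted cnt.keys (fun n => rankOf cnt n)
  (ordered.foldl (fun (d : PySem.Dict String Int) n => d.insert n (rankOf cnt n))
    PySem.Dict.empty).items

-- ===== PRECONDITION & SPEC =====
-- Pre_ excludes exactly the inputs where A raises KeyError: an incident without a 'nature' key.
def Pre_rank_incidents (incident_data : List (List (String × String))) : Prop :=
  incident_data.all (fun inc => (PySem.Dict.ofList inc).contains "nature") = true
instance (incident_data : List (List (String × String))) : Decidable (Pre_rank_incidents incident_data) := by unfold Pre_rank_incidents; infer_instance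
def pvWitness_rank_incidents : (List (List (String × String))) :=
  [[("nature", "Fire")], [("nature", "Theft")], [("nature", "Fire")]]

def Spec_rank_incidents (incident_data : List (List (String × String))) (out : List (String × Int)) : Prop := out = rank_incidents_alt incident_data
instance (incident_data : List (List (String × String))) (out : List (String × Int)) : Decidable (Spec_rank_incidents incident_data out) := by unfold Spec_rank_incidents; infer_instance

-- ===== CLAIM (what is proved, stated in full; the proofs are below) =====
def Claim_equal_rank_incidents : Prop := ∀ (incident_data : List (List (String × String))), Dom_rank_incidents incident_data → Pre_rank_incidents incident_data → Spec_rank_incidents incident_data (rank_incidents incident_data)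

-- ===== LEMMAS AND PROOFS =====

-- the display order's key: (-count, name), lexicographic
def lexKey (c : String → Int) (n : String) : Lex (Int × String) := toLex (-(c n), n)

-- the common characterisation: ranks assigned left to right, starting at r, advancing by c n
def ranksAux (c : String → Int) : List String → Int → List (String × Int)
  | [], _ => []
  | n :: t, r => (n, r) :: ranksAux c t (r + c n)

-- A's accumulator loop produces ranksAux (fresh distinct keys append to the dict)
theorem foldA_items (c : String → Int) :
    ∀ (names : List String) (d : PySem.Dict String Int) (r : Int),
      names.Nodup → (∀ n ∈ names, d.contains n = false) →
      ((names.foldl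
          (fun (s : PySem.Dict String Int × Int) n => (s.1.insert n s.2, s.2 + c n))
          (d, r)).1).items = d.items ++ ranksAux c names r := by
  intro names
  induction names with
  | nil => intro d r _ _; simp [ranksAux]
  | cons n t ih =>
    intro d r hnd hfresh
    have hn : d.contains n = false := hfresh n (by simp)
    have ht : ∀ m ∈ t, (d.insert n r).contains m = false := by
      intro m hm
      rw [PySem.Dict.contains_insert]
      have hmn : m ≠ n := fun h => (List.nodup_cons.mp hnd).1 (h ▸ hm)
      simp [hmn, hfresh m (List.mem_cons_of_mem _ hm)]
    simp only [List.foldl_cons]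
    rw [ih (d.insert n r) (r + c n) (List.nodup_cons.mp hnd).2 ht,
        PySem.Dict.items_insert_of_not_contains d r hn]
    simp [ranksAux]

-- A's tuple-keyed sort is the sort by the lexicographic key
theorem sorted2_eq_sorted_lex (xs : List String) (k1 : String → Int) :
    PySem.List.sorted2 xs k1 (fun x => x) false
      = PySem.List.sorted xs (fun x => toLex (k1 x, x)) := by
  rw [PySem.List.sorted_eq_foldl_insertBy]
  simp only [PySem.List.sorted2]
  have h : (fun a b : String =>
        (decide (k1 a < k1 b) || (!decide (k1 b < k1 a) && decide (a < b))))
      = (fun a b : String => decide (toLex (k1 a, a) < toLex (k1 b, b))) := by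
    funext a b
    by_cases h1 : k1 a < k1 b <;> by_cases h2 : k1 b < k1 a <;> by_cases h3 : a < b <;>
      simp [h1, h2, h3, Prod.Lex.toLex_lt_toLex] <;> omega
  rw [h]
  simp

-- every element of ranksAux carries a rank ≥ the start
theorem ranksAux_ge (c : String → Int) :
    ∀ (l : List String) (a : Int), (∀ n ∈ l, 0 < c n) →
      ∀ p ∈ ranksAux c l a, a ≤ p.2 := by
  intro l
  induction l with
  | nil => intro a _ p hp; simp [ranksAux] at hp
  | cons n t ih =>
    intro a hpos p hp
    simp only [ranksAux, List.mem_cons] at hp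
    rcases hp with rfl | hp
    · simp
    · have h1 := ih (a + c n) (fun m hm => hpos m (List.mem_cons_of_mem _ hm)) p hp
      have h2 : 0 < c n := hpos n (by simp)
      omega

-- ranks strictly increase along ranksAux
theorem ranksAux_pairwise (c : String → Int) :
    ∀ (l : List String) (a : Int), (∀ n ∈ l, 0 < c n) →
      (ranksAux c l a).Pairwise (fun p q => p.2 < q.2) := by
  intro l
  induction l with
  | nil => intro a _; simp [ranksAux]
  | cons n t ih =>
    intro a hpos
    have hpos' : ∀ m ∈ t, 0 < c m := fun m hm => hpos m (List.mem_cons_of_mem _ hm)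
    simp only [ranksAux]
    refine List.pairwise_cons.mpr ⟨?_, ih (a + c n) hpos'⟩
    intro q hq
    have h1 := ranksAux_ge c t (a + c n) hpos' q hq
    have h2 : 0 < c n := hpos n (by simp)
    omega

-- ranksAux over a strictly key-sorted list = independent dominance sums
theorem ranksAux_eq_map (c : String → Int) :
    ∀ (l : List String) (a : Int),
      l.Pairwise (fun m n => lexKey c m < lexKey c n) →
      ranksAux c l a
        = l.map (fun n =>
            (n, a + ((l.filter (fun t => decide (lexKey c t < lexKey c n))).map c).sum)) := by
  intro l
  induction l with
  | nil => intro a _; simp [ranksAux]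
  | cons n t ih =>
    intro a hpw
    obtain ⟨hhead, htail⟩ := List.pairwise_cons.mp hpw
    have hself : (decide (lexKey c n < lexKey c n)) = false := by simp
    have hfilt : t.filter (fun t' => decide (lexKey c t' < lexKey c n)) = [] := by
      rw [List.filter_eq_nil_iff]
      intro t' ht'
      simp only [decide_eq_true_eq]
      exact fun hlt => absurd (hhead t' ht') (lt_asymm hlt)
    simp only [ranksAux, List.map_cons, List.filter_cons, hself]
    refine List.cons_eq_cons.mpr ⟨?_, ?_⟩
    · simp [hfilt]
    · rw [ih (a + c n) htail]
      refine List.map_congr_left ?_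
      intro m hm
      refine Prod.ext rfl ?_
      have hif : (decide (lexKey c n < lexKey c m)) = true := by simp [hhead m hm]
      rw [if_pos hif]
      simp only [List.map_cons, List.sum_cons]
      ring

-- the rankOf fold is the dominance sum over the distinct types
theorem rankOf_eq (types : List String) (n : String) :
    rankOf (PySem.Dict.counter types) n
      = 1 + (((PySem.Set.ofList types).filter
            (fun t => decide (lexKey (fun m => ((types.count m : Int))) t
                              < lexKey (fun m => ((types.count m : Int))) n))).map
            (fun t => ((types.count t : Int)))).sum := by
  unfold rankOf
  rw [PySem.List.foldl_ite_eq_foldl_filter, PySem.List.foldl_add,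
      PySem.Dict.items_counter]
  simp only [PySem.Dict.getD_counter, List.filter_map, List.map_map, zero_add]
  have hpred : ((fun x : String × Int =>
        decide (-x.2 < -((types.count n : Int)) ∨ (-x.2 = -((types.count n : Int)) ∧ x.1 < n)))
          ∘ (fun k : String => (k, ((types.count k : Int)))))
      = (fun t => decide (lexKey (fun m => ((types.count m : Int))) t
                          < lexKey (fun m => ((types.count m : Int))) n)) := by
    funext t
    simp only [Function.comp_apply, lexKey, Prod.Lex.toLex_lt_toLex]
  rw [hpred]
  rfl

-- ===== VERDICT (by name: the statement is the Claim_ definition above) =====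
theorem rank_incidents_spec : Claim_equal_rank_incidents := by
  intro incident_data _hdom _hpre
  unfold Spec_rank_incidents rank_incidents rank_incidents_alt
  simp only []
  set types := incident_data.map natureOf with htypes
  set cnt := PySem.Dict.counter types with hcnt
  set c : String → Int := fun m => cnt.getD m 0 with hc
  have hcc : c = fun m => ((types.count m : Int)) := by
    funext m; exact PySem.Dict.getD_counter types m
  have hkeys : cnt.keys = PySem.Set.ofList types := PySem.Dict.keys_counter types
  have hkeysnd : cnt.keys.Nodup := by rw [hkeys]; exact PySem.Set.nodup_ofList types
  -- A's sort is the sort by the lexicographic key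
  have hsort2 :
      PySem.List.sorted2 cnt.keys (fun x => -(cnt.getD x 0)) (fun x => x) false
        = PySem.List.sorted cnt.keys (lexKey c) :=
    sorted2_eq_sorted_lex cnt.keys (fun x => -(cnt.getD x 0))
  set names := PySem.List.sorted cnt.keys (lexKey c) with hnamesdef
  have hperm : names.Perm cnt.keys := PySem.List.sorted_perm cnt.keys _ false
  have hnd : names.Nodup := hperm.nodup_iff.mpr hkeysnd
  -- names is strictly increasing under lexKey
  have hle : names.Pairwise (fun a b => lexKey c a ≤ lexKey c b) :=
    PySem.List.sorted_pairwise cnt.keys (lexKey c)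
  have hlt : names.Pairwise (fun a b => lexKey c a < lexKey c b) := by
    refine (hle.and hnd).imp ?_
    rintro a b ⟨hab, hne⟩
    refine lt_of_le_of_ne hab ?_
    intro hk
    exact hne (congrArg (fun z => (ofLex z).2) hk)
  -- positivity: every listed type occurs in the data
  have hpos : ∀ n ∈ names, 0 < c n := by
    intro n hn
    have hmem : n ∈ cnt.keys := hperm.mem_iff.mp hn
    rw [hkeys, PySem.Set.mem_ofList] at hmem
    have hcountpos := List.count_pos_iff.mpr hmem
    simp only [hcc]
    exact_mod_cast hcountpos
  -- A's loop result
  have hA : ((names.foldl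
        (fun (s : PySem.Dict String Int × Int) incident =>
          (s.1.insert incident s.2, s.2 + cnt.getD incident 0))
        (PySem.Dict.empty, 1)).1).items = PySem.Dict.empty.items ++ ranksAux c names 1 :=
    foldA_items c names PySem.Dict.empty 1 hnd (fun n _ => rfl)
  -- ranksAux = map of independent rank values
  have hmap : ranksAux c names 1 = names.map (fun n => (n, rankOf cnt n)) := by
    rw [ranksAux_eq_map c names 1 hlt]
    refine List.map_congr_left ?_
    intro n _
    refine Prod.ext rfl ?_
    have hrank := rankOf_eq types n
    rw [← hcc, ← hkeys, ← hcnt] at hrank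
    have hpermf := hperm.filter (fun t => decide (lexKey c t < lexKey c n))
    have hsum :
        ((names.filter (fun t => decide (lexKey c t < lexKey c n))).map c).sum
          = ((cnt.keys.filter (fun t => decide (lexKey c t < lexKey c n))).map c).sum :=
      (hpermf.map c).sum_eq
    simp only [hsum, hrank]
  -- the ranks strictly increase along names
  have hrpw : names.Pairwise (fun a b => rankOf cnt a < rankOf cnt b) := by
    have h := ranksAux_pairwise c names 1 hpos
    rw [hmap] at h
    have h2 := List.pairwise_map.mp h
    exact h2
  -- B's sort by rank reproduces names
  have hordered : PySem.List.sorted cnt.keys (fun n => rankOf cnt n) = names :=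
    PySem.List.sorted_eq_of_perm_of_pairwise_lt cnt.keys names
      (fun n => rankOf cnt n) hperm hrpw
  -- B's dict build
  have hB : ((names.foldl
        (fun (d : PySem.Dict String Int) n => d.insert n (rankOf cnt n))
        PySem.Dict.empty).items) = names.map (fun n => (n, rankOf cnt n)) := by
    have h := PySem.Dict.items_foldl_insert_fresh names (fun a => a)
      (fun a => rankOf cnt a) PySem.Dict.empty (fun a _ => rfl) (by simpa using hnd)
    simpa using h
  rw [hsort2, hordered, hA, hmap, hB]
  have he : (PySem.Dict.empty : PySem.Dict String Int).items = ([] : List (String × Int)) := rfl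
  rw [he, List.nil_append]
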